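-- pv_equiv track=rewrite | github.com/xingyu-long/LeetCode-Solutions | Leetcode/src/com/company/stripe/find_best_closing_time.py | compute_penalty
-- ===== SOURCE A (Python) =====
-- def compute_penalty(log: str, closing_time: int) -> int:
--     states = log.split()
--     if not states:
--         return 0
--     n = len(states)
--     if closing_time > n:
--         return -1
--     res = 0
--     for i in range(n):
--         if i < closing_time:
--             if states[i] == "N":
--                 res += 1
--         else:
--             #  the store is closed from now
--             if states[i] == "Y":
--                 res += 1
--     return res
-- ===== SOURCE B (Python) =====
-- def compute_penalty(log: str, closing_time: int) -> int:
--     states = log.split()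
--     if not states:
--         return 0
--     if closing_time > len(states):
--         return -1
--     # Start from the penalty of closing at time 0 (every "Y" costs 1),
--     # then walk the hours that are open and adjust: an open "Y" hour
--     # stops costing (-1), an open "N" hour starts costing (+1).
--     penalty = states.count("Y")
--     for s in states[:max(closing_time, 0)]:
--         if s == "Y":
--             penalty -= 1
--         elif s == "N":
--             penalty += 1
--     return penalty
-- ===== Notes on version B (the rewrite author's own statement) =====
-- stated objective: alternative
-- what changed: Instead of one full index-conditioned pass, B starts from the penalty of closing at time 0 (the total count of 'Y') and then adjusts it incrementally over only the open prefix (-1 per open 'Y', +1 per open 'N'), the standard running-penalty trick for this problem.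
import Mathlib
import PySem

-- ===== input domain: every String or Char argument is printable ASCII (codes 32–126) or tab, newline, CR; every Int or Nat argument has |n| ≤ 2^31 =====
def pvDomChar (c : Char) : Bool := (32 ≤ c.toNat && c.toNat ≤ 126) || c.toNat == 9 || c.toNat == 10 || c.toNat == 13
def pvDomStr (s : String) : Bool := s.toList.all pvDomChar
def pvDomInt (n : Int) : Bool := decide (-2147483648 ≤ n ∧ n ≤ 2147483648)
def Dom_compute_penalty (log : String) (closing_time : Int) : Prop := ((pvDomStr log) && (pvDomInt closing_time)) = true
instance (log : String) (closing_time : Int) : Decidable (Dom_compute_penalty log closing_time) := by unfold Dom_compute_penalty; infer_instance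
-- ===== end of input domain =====

-- B replaces A's full index-conditioned pass by the total-'Y' baseline plus an incremental
-- adjustment over only the open prefix (alternative decomposition; return-value equivalence).

-- ===== PORT A =====
def compute_penalty (log : String) (closing_time : Int) : Int :=
  let states := PySem.Str.split₀ log
  if states = [] then 0
  else
    let n : Int := states.length
    if closing_time > n then -1
    else
      (PySem.List.pyRange 0 n 1).foldl (fun res i =>
        if i < closing_time then
          (if PySem.List.pyGetD states i "" = "N" then res + 1 else res)
        else
          (if PySem.List.pyGetD states i "" = "Y" then res + 1 else res)) 0

-- ===== PORT B =====
def compute_penalty_alt (log : String) (closing_time : Int) : Int :=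
  let states := PySem.Str.split₀ log
  if states = [] then 0
  else
    if closing_time > (states.length : Int) then -1
    else
      let penalty : Int := PySem.List.count states "Y"
      (PySem.List.slice states none (some (max closing_time 0))).foldl
        (fun p s => if s = "Y" then p - 1 else if s = "N" then p + 1 else p) penalty

-- ===== PRECONDITION & SPEC =====
def Spec_compute_penalty (log : String) (closing_time : Int) (out : Int) : Prop := out = compute_penalty_alt log closing_time
instance (log : String) (closing_time : Int) (out : Int) : Decidable (Spec_compute_penalty log closing_time out) := by unfold Spec_compute_penalty; infer_instance

-- ===== CLAIM (what is proved, stated in full; the proofs are below) =====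
def Claim_equal_compute_penalty : Prop := ∀ (log : String) (closing_time : Int), Dom_compute_penalty log closing_time → Spec_compute_penalty log closing_time (compute_penalty log closing_time)

-- ===== LEMMAS AND PROOFS =====

-- Core invariant relating A's enumerate-style pass to B's baseline-plus-correction pass.
lemma pv_key (l : List String) (c s acc : Int) :
    (PySem.List.enumerate l s).foldl (fun res p =>
        if p.1 < c then
          (if p.2 = "N" then res + 1 else res)
        else
          (if p.2 = "Y" then res + 1 else res)) acc
    = (l.take (c - s).toNat).foldl
        (fun p x => if x = "Y" then p - 1 else if x = "N" then p + 1 else p)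
        (acc + (PySem.List.count l "Y" : Int)) := by
  induction l generalizing s acc with
  | nil => simp [PySem.List.enumerate_nil, PySem.List.count]
  | cons x xs ih =>
    rw [PySem.List.enumerate_cons]
    simp only [List.foldl_cons]
    by_cases hc : s < c
    · have ht : (c - s).toNat = (c - (s+1)).toNat + 1 := by omega
      rw [ht]
      simp only [List.take_succ_cons, List.foldl_cons]
      rw [ih (s+1)]
      congr 1
      by_cases hy : x = "Y"
      · simp [hy, hc, PySem.List.count]
        ring
      · by_cases hn : x = "N"
        · simp [hn, hc, PySem.List.count]
          ring
        · simp [hy, hn, hc, PySem.List.count]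
    · have ht : (c - s).toNat = 0 := by omega
      have ht' : (c - (s+1)).toNat = 0 := by omega
      rw [if_neg (by omega)]
      rw [ih (s+1)]
      rw [ht, ht']
      simp only [List.take_zero, List.foldl_nil]
      by_cases hy : x = "Y"
      · simp [hy, PySem.List.count]
        ring
      · simp [hy, PySem.List.count]

-- ===== VERDICT (by name: the statement is the Claim_ definition above) =====
theorem compute_penalty_spec : Claim_equal_compute_penalty := by
  intro log c _
  unfold Spec_compute_penalty compute_penalty compute_penalty_alt
  set states := PySem.Str.split₀ log with hs
  by_cases h0 : states = []
  · simp [h0]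
  · simp only [h0, if_false]
    by_cases h1 : c > (states.length : Int)
    · simp [h1]
    · simp only [h1, if_false]
      -- rewrite A's range fold as an enumerate fold
      have he : PySem.List.pyRange 0 (states.length : Int) 1
          = (PySem.List.enumerate states 0).map (·.1) := by
        rw [PySem.List.map_fst_enumerate]
        norm_num
      have hA : (PySem.List.pyRange 0 (states.length : Int) 1).foldl (fun res i =>
            if i < c then
              (if PySem.List.pyGetD states i "" = "N" then res + 1 else res)
            else
              (if PySem.List.pyGetD states i "" = "Y" then res + 1 else res)) (0 : Int)
          = (PySem.List.enumerate states 0).foldl (fun res p =>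
            if p.1 < c then
              (if p.2 = "N" then res + 1 else res)
            else
              (if p.2 = "Y" then res + 1 else res)) (0 : Int) := by
        rw [he, List.foldl_map]
        apply PySem.List.foldl_congr_mem
        intro acc p hp
        rcases (PySem.List.mem_enumerate_iff _ _ _).1 hp with ⟨k, hk, rfl⟩
        have hz : ((0 : Int) + k) = (k : Int) := by omega
        simp [hz, PySem.List.pyGetD_natCast, List.getElem?_eq_getElem hk]
      refine hA.trans ?_
      rw [pv_key states c 0 0]
      have hmax : (0 : Int) ≤ max c 0 := le_max_right _ _
      rw [PySem.List.slice_to states hmax]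
      have : (max c 0).toNat = (c - 0).toNat := by omega
      rw [this]
      simp
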